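-- pv_equiv track=rewrite | github.com/corentineuvrard/Advent-of-Code | 2023/Day02/day02.py | part2
-- ===== SOURCE A (Python) =====
-- from typing import List, Optional, Tuple
--
-- def part2(games: List[Tuple[int, List[List[Tuple[int, str]]]]]) -> int:
--     """
--     Solve part 2.
--     @param games: List of games.
--     @return: Sum of the power of the given sets.
--     """
--     power_sum = 0
--
--     for game in games:
--         game_id, color_groups = game
--         min_cubes = {'red': 0, 'green': 0, 'blue': 0}
--
--         for color_group in color_groups:
--             for count, color in color_group:
--                 if count > min_cubes[color]:
--                     min_cubes[color] = count
--
--         power = min_cubes['red'] * min_cubes['green'] * min_cubes['blue']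
--         power_sum += power
--
--     return power_sum
-- ===== SOURCE B (Python) =====
-- def part2(games):
--     def best(pairs, color):
--         return max([0] + [n for n, col in pairs if col == color])
--
--     total = 0
--     for _game_id, color_groups in games:
--         pairs = [p for g in color_groups for p in g]
--         total += best(pairs, 'red') * best(pairs, 'green') * best(pairs, 'blue')
--     return total
-- ===== Notes on version B (the rewrite author's own statement) =====
-- stated objective: idiomatic
-- what changed: Replaces the merged single pass updating a mutable color dict with a flatten-once then three independent filtered maxima (floored at 0) multiplied per game.
import Mathlib
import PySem

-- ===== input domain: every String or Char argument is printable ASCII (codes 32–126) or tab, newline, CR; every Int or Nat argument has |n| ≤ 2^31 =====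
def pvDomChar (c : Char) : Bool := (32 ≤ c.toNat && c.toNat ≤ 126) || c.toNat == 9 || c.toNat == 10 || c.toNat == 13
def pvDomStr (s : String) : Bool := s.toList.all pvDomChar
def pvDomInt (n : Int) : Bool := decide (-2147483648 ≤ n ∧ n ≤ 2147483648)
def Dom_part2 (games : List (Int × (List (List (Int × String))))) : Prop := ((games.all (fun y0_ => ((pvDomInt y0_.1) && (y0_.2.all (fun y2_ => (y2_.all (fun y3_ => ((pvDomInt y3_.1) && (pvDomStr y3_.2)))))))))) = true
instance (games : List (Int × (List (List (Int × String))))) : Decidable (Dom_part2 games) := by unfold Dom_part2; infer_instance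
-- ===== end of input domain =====

-- B flattens each game's groups once and takes three independent filtered maxima (floored at 0)
-- multiplied per game, instead of A's single merged pass over a mutable color dict (idiomatic).


-- ===== PORT A =====
-- min_cubes[color] raises KeyError in Python for a color outside the dict; getD … 0 is exact on
-- Pre_part2, where every color is one of the three initialised keys.
def part2 (games : List (Int × (List (List (Int × String))))) : Int :=
  games.foldl (fun power_sum game =>
    let color_groups := game.2
    let min_cubes : PySem.Dict String Int :=
      ((PySem.Dict.empty.insert "red" 0).insert "green" 0).insert "blue" 0
    let min_cubes := color_groups.foldl (fun d color_group =>
      color_group.foldl (fun d p =>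
        if p.1 > d.getD p.2 0 then d.insert p.2 p.1 else d) d) min_cubes
    let power := min_cubes.getD "red" 0 * min_cubes.getD "green" 0 * min_cubes.getD "blue" 0
    power_sum + power) 0

-- ===== PORT B =====
-- best pairs color = max([0] + [n for n, col in pairs if col == color]) (Python max as foldl max)
def bestB (pairs : List (Int × String)) (color : String) : Int :=
  (((pairs.filter (fun p => p.2 == color)).map (fun p => p.1)).foldl max 0)

def part2_alt (games : List (Int × (List (List (Int × String))))) : Int :=
  games.foldl (fun total game =>
    let pairs := game.2.flatMap (fun g => g)
    total + bestB pairs "red" * bestB pairs "green" * bestB pairs "blue") 0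

-- ===== PRECONDITION & SPEC =====
-- Pre_ admits exactly the inputs on which Python A returns: every drawn color must be one of the
-- three dict keys, otherwise min_cubes[color] raises KeyError.
def Pre_part2 (games : List (Int × (List (List (Int × String))))) : Prop :=
  ∀ game ∈ games, ∀ group ∈ game.2, ∀ p ∈ group,
    p.2 = "red" ∨ p.2 = "green" ∨ p.2 = "blue"
instance (games : List (Int × (List (List (Int × String))))) : Decidable (Pre_part2 games) := by unfold Pre_part2; infer_instance

def pvWitness_part2 : (List (Int × (List (List (Int × String))))) :=
  [(1, [[(3, "red"), (2, "blue")], [(1, "green")]])]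

def Spec_part2 (games : List (Int × (List (List (Int × String))))) (out : Int) : Prop := out = part2_alt games
instance (games : List (Int × (List (List (Int × String))))) (out : Int) : Decidable (Spec_part2 games out) := by unfold Spec_part2; infer_instance

-- ===== CLAIM (what is proved, stated in full; the proofs are below) =====
def Claim_equal_part2 : Prop := ∀ (games : List (Int × (List (List (Int × String))))), Dom_part2 games → Pre_part2 games → Spec_part2 games (part2 games)

-- ===== LEMMAS AND PROOFS =====

-- one update step of A's running-max dict, read back at color c
lemma getD_step (d : PySem.Dict String Int) (p : Int × String) (c : String) :
    (if p.1 > d.getD p.2 0 then d.insert p.2 p.1 else d).getD c 0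
      = if p.2 == c then max (d.getD c 0) p.1 else d.getD c 0 := by
  by_cases h : p.2 = c
  · subst h
    conv_rhs => rw [if_pos (show (p.2 == p.2) = true by simp)]
    split_ifs with hgt
    · rw [PySem.Dict.getD_insert]; simp; omega
    · omega
  · conv_rhs => rw [if_neg (show ¬ (p.2 == c) = true by simp [h])]
    split_ifs with hgt
    · rw [PySem.Dict.getD_insert, if_neg (fun hc => h hc.symm)]
    · rfl

-- A's inner fold over a flat pairs list computes, per color, a running max of the filtered counts
lemma fold_step_eq (ps : List (Int × String)) (d : PySem.Dict String Int) (c : String) :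
    (ps.foldl (fun d p => if p.1 > d.getD p.2 0 then d.insert p.2 p.1 else d) d).getD c 0
      = ((ps.filter (fun p => p.2 == c)).map (fun p => p.1)).foldl max (d.getD c 0) := by
  induction ps generalizing d with
  | nil => rfl
  | cons p ps ih =>
    simp only [List.foldl_cons, List.filter_cons]
    rw [ih, getD_step]
    by_cases h : p.2 = c
    · simp [h]
    · simp [h]

-- folding group-by-group equals folding the flattened pair list
lemma foldl_foldl_eq_flatMap {α β : Type} (f : β → α → β) (gs : List (List α)) (b : β) :
    gs.foldl (fun d g => g.foldl f d) b = (gs.flatMap (fun g => g)).foldl f b := by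
  induction gs generalizing b with
  | nil => rfl
  | cons g gs ih => simp [List.flatMap_cons, List.foldl_append, ih]

-- the initial dict reads 0 at every key
lemma getD_init (c : String) :
    (((PySem.Dict.empty.insert "red" (0:Int)).insert "green" 0).insert "blue" 0).getD c 0 = 0 := by
  simp only [PySem.Dict.getD_insert, PySem.Dict.getD_empty]
  split_ifs <;> rfl

lemma game_body_eq (game : Int × (List (List (Int × String)))) (c : String) :
    (game.2.foldl (fun d color_group =>
        color_group.foldl (fun d p => if p.1 > d.getD p.2 0 then d.insert p.2 p.1 else d) d)
      (((PySem.Dict.empty.insert "red" 0).insert "green" 0).insert "blue" 0)).getD c 0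
      = bestB (game.2.flatMap (fun g => g)) c := by
  rw [foldl_foldl_eq_flatMap, fold_step_eq, getD_init]
  rfl

-- ===== VERDICT (by name: the statement is the Claim_ definition above) =====
theorem part2_spec : Claim_equal_part2 := by
  intro games _ _
  unfold Spec_part2 part2 part2_alt
  induction games using List.reverseRecOn with
  | nil => rfl
  | append_singleton gs g ih =>
    simp only [List.foldl_append, List.foldl_cons, List.foldl_nil, game_body_eq]
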